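-- pv_equiv track=rewrite | github.com/JustKirill1/jam | fc.py | ageEnding
-- ===== SOURCE A (Python) =====
-- def ageEnding(randomAge): #get word ending for age
--     b = []
--     for i in str(int(randomAge)):
--         b.append(i)
--     if int(b[-1]) == 0 or 5 <= int(b[-1]) <= 9:
--         ending = " лет"
--     elif int(b[-1]) == 1:
--         if str(b)[-2:] == 11:
--             ending = " лет"
--         else:
--             ending = " год"
--     else:
--         ending = " года"
--     return ending
-- ===== SOURCE B (Python) =====
-- # Table lookup on the last decimal digit: closed-form modulo instead of building a char list.
-- ENDINGS = [" лет", " год", " года", " года", " года",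
--            " лет", " лет", " лет", " лет", " лет"]
--
-- def ageEnding(randomAge):  # get word ending for age
--     return ENDINGS[abs(int(randomAge)) % 10]
-- ===== Notes on version B (the rewrite author's own statement) =====
-- stated objective: simpler
-- what changed: Replaces the str()-char-list loop, negative indexing and three-way branch (with its dead str-vs-int 11 check) by a single table lookup indexed by the closed-form last digit abs(n) % 10.
import Mathlib
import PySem

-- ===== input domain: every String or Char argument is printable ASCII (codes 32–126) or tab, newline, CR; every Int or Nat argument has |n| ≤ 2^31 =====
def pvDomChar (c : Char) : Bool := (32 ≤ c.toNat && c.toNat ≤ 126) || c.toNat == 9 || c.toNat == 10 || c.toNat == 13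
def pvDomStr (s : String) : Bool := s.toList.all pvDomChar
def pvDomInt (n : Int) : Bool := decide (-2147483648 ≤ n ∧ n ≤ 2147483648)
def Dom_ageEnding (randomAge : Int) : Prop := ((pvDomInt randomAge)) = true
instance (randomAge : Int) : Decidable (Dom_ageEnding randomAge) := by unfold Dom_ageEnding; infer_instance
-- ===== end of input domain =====

-- B replaces A's string-digit loop and branch chain by a table lookup on abs(n) % 10 (simpler; same values).


-- ===== PORT A =====
def ageEnding (randomAge : Int) : String :=
  -- b = []; for i in str(int(randomAge)): b.append(i)
  let b : List Char := (PySem.Int.toStr randomAge).toList.foldl (fun acc i => acc ++ [i]) []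
  -- int(b[-1])  (in range: str(int(n)) is never empty; ValueError impossible: last char is a digit)
  let d : Int := (PySem.Int.ofStr? (String.ofList [PySem.List.pyGetD b (-1) ' '])).getD 0
  if d = 0 ∨ (5 ≤ d ∧ d ≤ 9) then " лет"
  else if d = 1 then
    -- Python: `if str(b)[-2:] == 11` compares a str slice with the int 11 — always False
    if False then " лет" else " год"
  else " года"

-- ===== PORT B =====
def pvEndings : List String :=
  [" лет", " год", " года", " года", " года", " лет", " лет", " лет", " лет", " лет"]

def ageEnding_alt (randomAge : Int) : String :=
  -- ENDINGS[abs(int(randomAge)) % 10]  (index is always 0..9, in range)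
  PySem.List.pyGetD pvEndings (PySem.Int.mod ((randomAge.natAbs : Nat) : Int) 10) " лет"

-- ===== PRECONDITION & SPEC =====
def Spec_ageEnding (randomAge : Int) (out : String) : Prop := out = ageEnding_alt randomAge
instance (randomAge : Int) (out : String) : Decidable (Spec_ageEnding randomAge out) := by unfold Spec_ageEnding; infer_instance

-- ===== CLAIM (what is proved, stated in full; the proofs are below) =====
def Claim_equal_ageEnding : Prop := ∀ (randomAge : Int), Dom_ageEnding randomAge → Spec_ageEnding randomAge (ageEnding randomAge)

-- ===== LEMMAS AND PROOFS =====

-- toDigitsCore (with positive fuel) ends in the digit char of n % 10.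
theorem pv_toDigitsCore_last (fuel : Nat) : ∀ (n : Nat) (ds : List Char),
    ∃ pre, Nat.toDigitsCore 10 (fuel + 1) n ds = pre ++ Nat.digitChar (n % 10) :: ds := by
  induction fuel with
  | zero =>
    intro n ds
    unfold Nat.toDigitsCore
    dsimp only
    split <;> exact ⟨[], rfl⟩
  | succ f ih =>
    intro n ds
    unfold Nat.toDigitsCore
    dsimp only
    split
    · exact ⟨[], rfl⟩
    · obtain ⟨p, hp⟩ := ih (n / 10) (Nat.digitChar (n % 10) :: ds)
      exact ⟨p ++ [Nat.digitChar (n / 10 % 10)], by rw [hp]; simp⟩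

theorem pv_toDigits_last (m : Nat) :
    ∃ pre, Nat.toDigits 10 m = pre ++ [Nat.digitChar (m % 10)] := by
  unfold Nat.toDigits
  obtain ⟨p, hp⟩ := pv_toDigitsCore_last m m []
  exact ⟨p, hp⟩

-- str(int(n)) ends in the digit char of |n| % 10.
theorem pv_toChars_last (n : Int) :
    ∃ pre, PySem.Int.toChars n = pre ++ [Nat.digitChar (n.natAbs % 10)] := by
  unfold PySem.Int.toChars
  split
  · rename_i h
    obtain ⟨p, hp⟩ := pv_toDigits_last n.natAbs
    exact ⟨'-' :: p, by rw [hp, List.cons_append]⟩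
  · rename_i h
    obtain ⟨p, hp⟩ := pv_toDigits_last n.toNat
    have he : n.toNat = n.natAbs := by omega
    rw [he] at hp ⊢
    exact ⟨p, hp⟩

theorem pv_final (r : Nat) (hr : r < 10) :
    (if (r : Int) = 0 ∨ (5 ≤ (r : Int) ∧ (r : Int) ≤ 9) then " лет"
     else if (r : Int) = 1 then (if False then " лет" else " год") else " года")
    = pvEndings.getD r " лет" := by
  interval_cases r <;> decide

theorem pv_digit_ofStr (r : Nat) (hr : r < 10) :
    PySem.Int.ofStr? (String.ofList [Nat.digitChar r]) = some (r : Int) := by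
  interval_cases r <;> decide

-- ===== VERDICT (by name: the statement is the Claim_ definition above) =====
theorem ageEnding_spec : Claim_equal_ageEnding := by
  intro n _
  unfold Spec_ageEnding ageEnding ageEnding_alt
  have hb : (PySem.Int.toStr n).toList.foldl (fun acc i => acc ++ [i]) [] = PySem.Int.toChars n := by
    rw [PySem.List.foldl_append_singleton, List.nil_append, PySem.Int.toList_toStr]
  obtain ⟨pre, hpre⟩ := pv_toChars_last n
  have hr : n.natAbs % 10 < 10 := Nat.mod_lt _ (by norm_num)
  have hm : PySem.Int.mod ((n.natAbs : Nat) : Int) 10 = ((n.natAbs % 10 : Nat) : Int) := by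
    exact_mod_cast PySem.Int.mod_natCast n.natAbs 10
  simp only [hb, hpre, PySem.List.pyGetD_neg_one_append_singleton,
    pv_digit_ofStr _ hr, Option.getD_some, hm, PySem.List.pyGetD_natCast]
  exact pv_final _ hr
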